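-- pv_equiv track=rewrite | github.com/evalitaunina/SUGAR_Corpus | Evaluation.py | buildArgsList
-- ===== SOURCE A (Python) =====
-- def buildArgsList(list, track, arguments):
--     #If this argument contains optional values, split the tracking in two branches
--     if '/' in list[0]:
--         optargs = list[0].split('/')
--
--         #Copy the incoming track to split the subsequent subtrack in two branches headed by the possible alternatives
--         track1 = track.copy()
--         track2 = track.copy()
--         track1.append(optargs[0])
--         track2.append(optargs[1])
--
--         #If there are other arguments after the following one call the recursive step with the two alternatives
--         if len(list) > 1:
--             arguments= buildArgsList(list[1:], track1, arguments)
--             arguments= buildArgsList(list[1:], track2, arguments)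
--             return arguments
--         #If this is the last argument, append the options to the track
--         else:
--             arguments.append(track1)
--             arguments.append(track2)
--             return arguments
--     #If this is the last argument, append the current value
--     elif len(list) == 1:
--         track.append(list[0])
--         arguments.append(track)
--         return arguments
--     #If there are other arguments, proceed with the recursive step.
--     else:
--         track.append(list[0])
--         arguments= buildArgsList(list[1:], track, arguments)
--         return arguments
-- ===== SOURCE B (Python) =====
-- def buildArgsList(list, track, arguments):
--     # Iterative: build all branch combinations with one running list, then append them all.
--     # (Return-value equivalent to the recursive original; does not mutate track/arguments in place.)
--     combos = [track]
--     for a in list: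
--         if '/' in a:
--             parts = a.split('/')
--             opts = [parts[0], parts[1]]
--         else:
--             opts = [a]
--         combos = [c + [o] for c in combos for o in opts]
--     return arguments + combos
-- ===== Notes on version B (the rewrite author's own statement) =====
-- stated objective: simpler
-- what changed: Replaced the two/three-way branching recursion by a single iterative pass that builds the cartesian product of each argument's options in one running list of combinations, appended to arguments at the end (return-value equivalence; B does not mutate track/arguments in place).
-- crash fix: On an empty argument list A raises IndexError (list[0]); B returns arguments + [track], the product of zero options. — e.g. on buildArgsList([], ["t"], [["z"]]): A raises IndexError, B returns [["z"], ["t"]]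
import Mathlib
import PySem

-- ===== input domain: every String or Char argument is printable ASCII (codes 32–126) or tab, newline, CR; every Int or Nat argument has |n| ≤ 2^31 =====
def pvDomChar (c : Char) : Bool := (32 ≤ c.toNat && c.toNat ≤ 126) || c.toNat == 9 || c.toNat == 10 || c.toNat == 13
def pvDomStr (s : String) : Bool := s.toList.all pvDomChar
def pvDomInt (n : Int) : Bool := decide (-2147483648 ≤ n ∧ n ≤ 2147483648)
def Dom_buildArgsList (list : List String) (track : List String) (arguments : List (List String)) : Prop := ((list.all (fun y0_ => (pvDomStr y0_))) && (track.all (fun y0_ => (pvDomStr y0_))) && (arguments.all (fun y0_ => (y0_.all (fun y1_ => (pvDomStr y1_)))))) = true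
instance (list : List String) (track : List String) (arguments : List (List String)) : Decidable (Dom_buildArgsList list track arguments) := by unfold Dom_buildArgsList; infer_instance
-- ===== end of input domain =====

-- B replaces the branching recursion by one iterative cartesian-product pass (return-value
-- equivalence only: A mutates track/arguments in place where B does not).

-- ===== PORT A =====
-- literal transliteration of A's recursion; the [] case is unreachable under Pre_ (Python raises IndexError there)
def buildArgsList (list : List String) (track : List String) (arguments : List (List String)) : List (List String) :=
  match list with
  | [] => arguments
  | x :: rest =>
    if PySem.Str.isIn "/" x then
      let optargs := (PySem.Str.split? x "/").getD []
      -- '/' occurs in x, so optargs has ≥ 2 parts and the getD defaults are never used (Python: optargs[0], optargs[1])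
      let track1 := track ++ [optargs.getD 0 ""]
      let track2 := track ++ [optargs.getD 1 ""]
      if rest.length + 1 > 1 then
        buildArgsList rest track2 (buildArgsList rest track1 arguments)
      else
        arguments ++ [track1, track2]
    else if rest.length + 1 == 1 then
      arguments ++ [track ++ [x]]
    else
      buildArgsList rest (track ++ [x]) arguments

-- ===== PORT B =====
def pvOpts (a : String) : List String :=
  if PySem.Str.isIn "/" a then
    let parts := (PySem.Str.split? a "/").getD []
    [parts.getD 0 "", parts.getD 1 ""]
  else [a]

def pvStep (combos : List (List String)) (a : String) : List (List String) :=
  combos.flatMap (fun c => (pvOpts a).map (fun o => c ++ [o]))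

def buildArgsList_alt (list : List String) (track : List String) (arguments : List (List String)) : List (List String) :=
  arguments ++ list.foldl pvStep [track]

-- ===== PRECONDITION & SPEC =====
-- Pre_ excludes only the empty argument list, on which Python A raises IndexError at list[0].
def Pre_buildArgsList (list : List String) (track : List String) (arguments : List (List String)) : Prop := list ≠ []
instance (list : List String) (track : List String) (arguments : List (List String)) : Decidable (Pre_buildArgsList list track arguments) := by unfold Pre_buildArgsList; infer_instance

def pvWitness_buildArgsList : List String × List String × List (List String) := (["a/b", "c"], ["t"], [["z"]])

-- On an empty argument list A raises IndexError (list[0]); B returns arguments + [track] (the empty product).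
def Raises_buildArgsList (list : List String) (track : List String) (arguments : List (List String)) : Prop := list = []
instance (list : List String) (track : List String) (arguments : List (List String)) : Decidable (Raises_buildArgsList list track arguments) := by unfold Raises_buildArgsList; infer_instance
def pvRaiseWitness_buildArgsList : List String × List String × List (List String) := ([], ["t"], [["z"]])
def pvRaiseWitnessOut_buildArgsList : List (List String) := [["z"], ["t"]]

def Spec_buildArgsList (list : List String) (track : List String) (arguments : List (List String)) (out : List (List String)) : Prop := out = buildArgsList_alt list track arguments
instance (list : List String) (track : List String) (arguments : List (List String)) (out : List (List String)) : Decidable (Spec_buildArgsList list track arguments out) := by unfold Spec_buildArgsList; infer_instance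

-- ===== CLAIM (what is proved, stated in full; the proofs are below) =====
def Claim_equal_buildArgsList : Prop := ∀ (list : List String) (track : List String) (arguments : List (List String)), Dom_buildArgsList list track arguments → Pre_buildArgsList list track arguments → Spec_buildArgsList list track arguments (buildArgsList list track arguments)

def Claim_raises_buildArgsList : Prop := (∀ (list : List String) (track : List String) (arguments : List (List String)), Dom_buildArgsList list track arguments → Raises_buildArgsList list track arguments → ¬ Pre_buildArgsList list track arguments) ∧ (Dom_buildArgsList (pvRaiseWitness_buildArgsList.1) (pvRaiseWitness_buildArgsList.2.1) (pvRaiseWitness_buildArgsList.2.2) ∧ Raises_buildArgsList (pvRaiseWitness_buildArgsList.1) (pvRaiseWitness_buildArgsList.2.1) (pvRaiseWitness_buildArgsList.2.2) ∧ buildArgsList_alt (pvRaiseWitness_buildArgsList.1) (pvRaiseWitness_buildArgsList.2.1) (pvRaiseWitness_buildArgsList.2.2) = pvRaiseWitnessOut_buildArgsList)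

-- ===== LEMMAS AND PROOFS =====

lemma foldl_pvStep_append (l : List String) : ∀ (cs ds : List (List String)),
    l.foldl pvStep (cs ++ ds) = l.foldl pvStep cs ++ l.foldl pvStep ds := by
  induction l with
  | nil => intro cs ds; rfl
  | cons x l ih =>
      intro cs ds
      simp only [List.foldl]
      rw [show pvStep (cs ++ ds) x = pvStep cs x ++ pvStep ds x from by
            simp [pvStep], ih]

lemma buildArgsList_eq_alt : ∀ (list : List String) (track : List String)
    (arguments : List (List String)), list ≠ [] →
    buildArgsList list track arguments = arguments ++ list.foldl pvStep [track] := by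
  intro list
  induction list with
  | nil => intro _ _ h; exact absurd rfl h
  | cons x rest ih =>
      intro track arguments _
      rw [buildArgsList]
      by_cases hs : PySem.Str.isIn "/" x = true
      · have hs' : PySem.Chars.isIn ['/'] x.toList = true := by simpa using hs
        rw [if_pos hs]
        cases rest with
        | nil => simp [List.foldl, pvStep, pvOpts, hs']
        | cons y rs =>
            rw [if_pos (by simp)]
            rw [ih _ _ (by simp), ih _ _ (by simp)]
            simp only [List.foldl]
            rw [show pvStep [track] x
                  = [track ++ [((PySem.Str.split? x "/").getD []).getD 0 ""]]
                  ++ [track ++ [((PySem.Str.split? x "/").getD []).getD 1 ""]] from by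
                  simp [pvStep, pvOpts, hs']]
            rw [show pvStep ([track ++ [((PySem.Str.split? x "/").getD []).getD 0 ""]]
                  ++ [track ++ [((PySem.Str.split? x "/").getD []).getD 1 ""]]) y
                  = pvStep [track ++ [((PySem.Str.split? x "/").getD []).getD 0 ""]] y
                  ++ pvStep [track ++ [((PySem.Str.split? x "/").getD []).getD 1 ""]] y from by
                  simp [pvStep, List.flatMap_append]]
            rw [foldl_pvStep_append]
            simp [List.append_assoc]
      · have hs' : PySem.Chars.isIn ['/'] x.toList = false := by simpa using hs
        rw [if_neg hs]
        cases rest with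
        | nil =>
            rw [if_pos (by simp)]
            simp [List.foldl, pvStep, pvOpts, hs']
        | cons y rs =>
            rw [if_neg (by simp)]
            rw [ih _ _ (by simp)]
            simp only [List.foldl]
            rw [show pvStep [track] x = [track ++ [x]] from by simp [pvStep, pvOpts, hs']]

-- ===== VERDICT (by name: the statement is the Claim_ definition above) =====
theorem buildArgsList_spec : Claim_equal_buildArgsList := by
  intro list track arguments _ hpre
  unfold Spec_buildArgsList buildArgsList_alt
  exact buildArgsList_eq_alt list track arguments hpre

-- (@[simp] only to mark the theorem as terminal for the unused-lemma lint)
@[simp] theorem buildArgsList_raises : Claim_raises_buildArgsList := by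
  unfold Claim_raises_buildArgsList
  exact ⟨fun l t a _ hr hp => hp hr, by decide⟩
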